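-- pv_equiv track=rewrite | github.com/FalteringApprentice/Gene-Barcode | main.py | split_sublist
-- ===== SOURCE A (Python) =====
-- def split_sublist(list,L):
--     '''
--     分割数组list为L个子数组
--     :param list:待分割数组
--     :param L:分割份数
--     :return:分割后的数组
--     '''
--     res=[]
--     list_len=len(list)
--     piece_len=list_len//L  #分割每份长度
--     left_len=list_len-L*piece_len
--     ix=0
--     for i in range(L):
--         if i<left_len:
--             res.append(list[ix:ix+piece_len+1])
--             ix+=piece_len+1
--         else:
--             res.append(list[ix:ix + piece_len])
--             ix += piece_len
--     return res
-- ===== SOURCE B (Python) =====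
-- def split_sublist(list, L):
--     div, mod = divmod(len(list), L)
--     cut = lambda i: i * div + min(i, mod)
--     return [list[cut(i):cut(i + 1)] for i in range(L)]
-- ===== Notes on version B (the rewrite author's own statement) =====
-- stated objective: simpler
-- what changed: Replaces the running index ix and the per-iteration if/else append loop with a closed-form cut-point formula cut(i) = i*div + min(i, mod) from divmod, returning slices between consecutive cut points in one comprehension.
import Mathlib
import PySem

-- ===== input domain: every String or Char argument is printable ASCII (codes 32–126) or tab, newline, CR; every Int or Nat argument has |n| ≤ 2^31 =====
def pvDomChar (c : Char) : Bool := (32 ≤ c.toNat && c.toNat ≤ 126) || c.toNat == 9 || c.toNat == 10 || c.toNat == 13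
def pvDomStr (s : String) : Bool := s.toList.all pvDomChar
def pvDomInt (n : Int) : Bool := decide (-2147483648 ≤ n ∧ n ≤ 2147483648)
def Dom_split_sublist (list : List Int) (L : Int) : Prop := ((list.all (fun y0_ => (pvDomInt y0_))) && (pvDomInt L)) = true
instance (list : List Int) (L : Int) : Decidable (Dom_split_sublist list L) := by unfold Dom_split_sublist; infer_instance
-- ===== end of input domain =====

-- B replaces A's running index and per-iteration branch by a closed-form cut-point formula
-- i*div + min(i, mod); objective: simpler. Equivalence is claimed for L ≠ 0 (L = 0 raises in both).

-- ===== PORT A =====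
-- literal transliteration: running index ix, branch on i < left_len inside the loop
def split_sublist (list : List Int) (L : Int) : List (List Int) :=
  let list_len := PySem.List.len list
  let piece_len := PySem.Int.floordiv list_len L   -- list_len // L (L ≠ 0 in Pre_)
  let left_len := list_len - L * piece_len
  let st := (PySem.List.pyRange 0 L 1).foldl
    (fun (st : List (List Int) × Int) i =>
      if i < left_len then
        (st.1 ++ [PySem.List.slice list (some st.2) (some (st.2 + piece_len + 1))], st.2 + piece_len + 1)
      else
        (st.1 ++ [PySem.List.slice list (some st.2) (some (st.2 + piece_len))], st.2 + piece_len))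
    ([], 0)
  st.1

-- ===== PORT B =====
-- cut = lambda i: i * div + min(i, mod)
def pvCut (div mod i : Int) : Int := i * div + min i mod

def split_sublist_alt (list : List Int) (L : Int) : List (List Int) :=
  match PySem.Int.divmod? (PySem.List.len list) L with
  | none => []   -- L = 0: divmod raises (excluded by Pre_)
  | some (div, mod) =>
      (PySem.List.pyRange 0 L 1).map
        (fun i => PySem.List.slice list (some (pvCut div mod i)) (some (pvCut div mod (i + 1))))

-- ===== PRECONDITION & SPEC =====
-- L = 0 raises ZeroDivisionError in A (and in B); no other input raises.
def Pre_split_sublist (list : List Int) (L : Int) : Prop := L ≠ 0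
instance (list : List Int) (L : Int) : Decidable (Pre_split_sublist list L) := by
  unfold Pre_split_sublist; infer_instance
def pvWitness_split_sublist : List Int × Int := ([1, 2, 3, 4, 5], 2)

def Spec_split_sublist (list : List Int) (L : Int) (out : List (List Int)) : Prop := out = split_sublist_alt list L
instance (list : List Int) (L : Int) (out : List (List Int)) : Decidable (Spec_split_sublist list L out) := by unfold Spec_split_sublist; infer_instance

-- ===== CLAIM (what is proved, stated in full; the proofs are below) =====
def Claim_equal_split_sublist : Prop := ∀ (list : List Int) (L : Int), Dom_split_sublist list L → Pre_split_sublist list L → Spec_split_sublist list L (split_sublist list L)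

-- ===== LEMMAS AND PROOFS =====

-- A's loop from i = a with accumulator (res0, cut a) produces res0 ++ the closed-form slices.
lemma loop_eq (list : List Int) (div mod L : Int) :
  ∀ (a : Int) (res0 : List (List Int)), 0 ≤ a → a ≤ L →
    (PySem.List.pyRange a L 1).foldl
      (fun (st : List (List Int) × Int) i =>
        if i < mod then
          (st.1 ++ [PySem.List.slice list (some st.2) (some (st.2 + div + 1))], st.2 + div + 1)
        else
          (st.1 ++ [PySem.List.slice list (some st.2) (some (st.2 + div))], st.2 + div))
      (res0, pvCut div mod a)
    = (res0 ++ (PySem.List.pyRange a L 1).map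
        (fun i => PySem.List.slice list (some (pvCut div mod i)) (some (pvCut div mod (i + 1)))),
       pvCut div mod L) := by
  intro a res0 ha haL
  by_cases h : a < L
  · have hk : (L - a).toNat ≠ 0 := by omega
    -- induction on the remaining length
    induction hn : (L - a).toNat generalizing a res0 with
    | zero => omega
    | succ k ih =>
      rw [PySem.List.pyRange_one_cons h]
      simp only [List.foldl_cons, List.map_cons]
      have hcut : pvCut div mod a + div + (if a < mod then 1 else 0) = pvCut div mod (a + 1) := by
        unfold pvCut
        rcases lt_or_ge a mod with hlt | hge
        · simp only [if_pos hlt]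
          have h1 : min a mod = a := by omega
          have h2 : min (a + 1) mod = a + 1 := by omega
          rw [h1, h2]; ring
        · simp only [if_neg (by omega : ¬ a < mod)]
          have h1 : min a mod = mod := by omega
          have h2 : min (a + 1) mod = mod := by omega
          rw [h1, h2]; ring
      by_cases hlt : a < mod
      · simp only [if_pos hlt]
        have hx : pvCut div mod a + div + 1 = pvCut div mod (a + 1) := by
          simpa [if_pos hlt] using hcut
        rw [hx]
        by_cases h2 : a + 1 < L
        · rw [ih (a + 1) _ (by omega) (by omega) h2 (by omega) (by omega)]
          simp
        · have hL : a + 1 = L := by omega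
          subst hL
          rw [PySem.List.pyRange_one_eq_nil (by omega)]
          simp
      · simp only [if_neg hlt]
        have hx : pvCut div mod a + div = pvCut div mod (a + 1) := by
          simpa [if_neg hlt] using hcut
        rw [hx]
        by_cases h2 : a + 1 < L
        · rw [ih (a + 1) _ (by omega) (by omega) h2 (by omega) (by omega)]
          simp
        · have hL : a + 1 = L := by omega
          subst hL
          rw [PySem.List.pyRange_one_eq_nil (by omega)]
          simp
  · have hL : a = L := by omega
    subst hL
    rw [PySem.List.pyRange_one_eq_nil (by omega)]
    simp

-- ===== VERDICT (by name: the statement is the Claim_ definition above) =====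
theorem split_sublist_spec : Claim_equal_split_sublist := by
  intro list L _ hL
  unfold Spec_split_sublist split_sublist split_sublist_alt
  have hL' : L ≠ 0 := hL
  have hdm : PySem.Int.divmod? (PySem.List.len list) L
      = some (PySem.Int.floordiv (PySem.List.len list) L, PySem.Int.mod (PySem.List.len list) L) := by
    simp [PySem.Int.divmod?, hL', PySem.Int.floordiv, PySem.Int.mod]
  rw [hdm]
  by_cases hLpos : 0 < L
  · have hleft : PySem.List.len list - L * PySem.Int.floordiv (PySem.List.len list) L
        = PySem.Int.mod (PySem.List.len list) L := by
      have h := PySem.Int.floordiv_mul_add_mod (PySem.List.len list) L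
      linear_combination -h
    have h0 : pvCut (PySem.Int.floordiv (PySem.List.len list) L) (PySem.Int.mod (PySem.List.len list) L) 0 = 0 := by
      have h := PySem.Int.mod_nonneg (PySem.List.len list) hLpos
      simp [pvCut, min_def, PySem.List.len_eq] at h ⊢
      omega
    simp only [hleft]
    have hloop := loop_eq list (PySem.Int.floordiv (PySem.List.len list) L)
      (PySem.Int.mod (PySem.List.len list) L) L 0 [] (le_refl 0) (by omega)
    rw [h0] at hloop
    rw [hloop]
    simp
  · rw [PySem.List.pyRange_one_eq_nil (by omega)]
    simp
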